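-- pv_equiv track=rewrite | github.com/massymas12/gravwell | gravwell/graph/analysis.py | _dc_hostname
-- ===== SOURCE A (Python) =====
-- def _dc_hostname(hostnames: list[str]) -> bool:
--     """Return True if any hostname matches a Domain Controller pattern."""
--     for hn in hostnames:
--         parts = hn.lower().replace("-", ".").replace("_", ".").split(".")
--         for p in parts:
--             if p == "dc":
--                 return True
--             if len(p) > 2 and p.startswith("dc") and p[2:].isdigit():
--                 return True
--             if "domaincontroller" in p:
--                 return True
--     return False
-- ===== SOURCE B (Python) =====
-- def _scan_dc(s):
--     # one-pass DFA over s; 0 at token start, 1 doomed token, 2 seen 'd' at token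
--     # start, 3 seen 'dc'+digits*, 4 accepted
--     st = 0
--     for ch in s:
--         if st == 4:
--             st = 4
--         elif ch in "._-":
--             st = 4 if st == 3 else 0
--         elif st == 0:
--             st = 2 if ch == "d" else 1
--         elif st == 2:
--             st = 3 if ch == "c" else 1
--         elif st == 3:
--             st = 3 if "0" <= ch <= "9" else 1
--         else:
--             st = 1
--     return st >= 3
--
--
-- def _dc_hostname(hostnames: list[str]) -> bool:
--     """Return True if any hostname matches a Domain Controller pattern."""
--     return any(
--         "domaincontroller" in hn.lower() or _scan_dc(hn.lower()) for hn in hostnames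
--     )
-- ===== Notes on version B (the rewrite author's own statement) =====
-- stated objective: alternative
-- what changed: Replaces the lower/replace/replace/split token-list construction and nested token scan with a single substring test plus a one-pass five-state DFA over each lowercased hostname, building no intermediate lists.
import Mathlib
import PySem

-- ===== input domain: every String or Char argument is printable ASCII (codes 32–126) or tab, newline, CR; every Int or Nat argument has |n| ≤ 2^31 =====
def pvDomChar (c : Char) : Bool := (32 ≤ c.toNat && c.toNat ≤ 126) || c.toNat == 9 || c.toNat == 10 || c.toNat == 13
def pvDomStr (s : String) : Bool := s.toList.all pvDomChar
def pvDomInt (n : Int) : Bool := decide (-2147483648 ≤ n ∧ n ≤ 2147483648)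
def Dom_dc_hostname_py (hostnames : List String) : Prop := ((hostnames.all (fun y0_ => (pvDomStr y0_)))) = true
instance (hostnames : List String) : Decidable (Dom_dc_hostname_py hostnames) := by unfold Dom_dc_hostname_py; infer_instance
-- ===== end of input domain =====

-- B replaces A's lower/replace/replace/split token construction and nested token
-- scan with a substring test plus a one-pass five-state DFA over each lowercased
-- hostname (alternative decomposition; equivalence of return values is proved).

-- ===== PORT A =====
def dc_hostname_py (hostnames : List String) : Bool :=
  hostnames.any fun hn =>
    let parts := PySem.Chars.splitOn
      (PySem.Str.replace (PySem.Str.replace (PySem.Str.lower hn) "-" ".") "_" ".").toList ['.']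
    parts.any fun p =>
      (p == "dc".toList) ||
      (decide ((2 : Int) < PySem.Chars.len p) && PySem.Chars.startswith p "dc".toList
        && PySem.Chars.strIsdigit (PySem.List.slice p (some 2) none)) ||
      PySem.Chars.isIn "domaincontroller".toList p

-- ===== PORT B =====
-- the DFA step of Source B's _scan_dc: 0 token start, 1 doomed token, 2 'd' at token
-- start, 3 'dc'+digits*, 4 accepted
def dcStep (st : Nat) (ch : Char) : Nat :=
  if st == 4 then 4
  else if ch == '.' || ch == '_' || ch == '-' then (if st == 3 then 4 else 0)
  else if st == 0 then (if ch == 'd' then 2 else 1)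
  else if st == 2 then (if ch == 'c' then 3 else 1)
  else if st == 3 then (if decide ('0' ≤ ch) && decide (ch ≤ '9') then 3 else 1)
  else 1

def dcScan (s : String) : Bool := decide (3 ≤ s.toList.foldl dcStep 0)

def dc_hostname_py_alt (hostnames : List String) : Bool :=
  hostnames.any fun hn =>
    PySem.Str.isIn "domaincontroller" (PySem.Str.lower hn) || dcScan (PySem.Str.lower hn)

-- ===== PRECONDITION & SPEC =====
def Spec_dc_hostname_py (hostnames : List String) (out : Bool) : Prop := out = dc_hostname_py_alt hostnames
instance (hostnames : List String) (out : Bool) : Decidable (Spec_dc_hostname_py hostnames out) := by unfold Spec_dc_hostname_py; infer_instance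

-- ===== CLAIM (what is proved, stated in full; the proofs are below) =====
def Claim_equal_dc_hostname_py : Prop := ∀ (hostnames : List String), Dom_dc_hostname_py hostnames → Spec_dc_hostname_py hostnames (dc_hostname_py hostnames)

-- ===== LEMMAS AND PROOFS =====

-- a delimiter of A's tokenisation
def pvIsDelim (c : Char) : Bool := c == '.' || c == '-' || c == '_'

-- structural split on a character predicate
def pvSplitc (d : Char → Bool) : List Char → List (List Char)
  | [] => [[]]
  | c :: t => if d c then [] :: pvSplitc d t else (pvSplitc d t).modifyHead (c :: ·)

theorem pvSplitc_ne_nil (d : Char → Bool) (t : List Char) : pvSplitc d t ≠ [] := by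
  cases t with
  | nil => simp [pvSplitc]
  | cons c t =>
    simp only [pvSplitc]
    split
    · simp
    · cases h : pvSplitc d t with
      | nil => exact absurd h (pvSplitc_ne_nil d t)
      | cons a l => simp [h]

theorem pvSplitc_cons_pos (d : Char → Bool) (c : Char) (t : List Char) (h : d c = true) :
    pvSplitc d (c :: t) = [] :: pvSplitc d t := by simp [pvSplitc, h]

theorem pvSplitc_cons_neg (d : Char → Bool) (c : Char) (t : List Char) (h : d c = false) :
    pvSplitc d (c :: t) = (pvSplitc d t).modifyHead (c :: ·) := by simp [pvSplitc, h]

-- single-char replace is a map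
theorem pvReplaceGo_single (o n' : Char) (fuel : Nat) :
    ∀ (s : List Char) (acc : List Char), s.length ≤ fuel →
      PySem.Chars.replace.go [o] [n'] fuel s acc
        = acc.reverse ++ s.map (fun c => if c = o then n' else c) := by
  induction fuel with
  | zero =>
    intro s acc h
    have : s = [] := List.eq_nil_of_length_eq_zero (Nat.le_zero.mp h)
    subst this
    simp [PySem.Chars.replace.go]
  | succ fuel ih =>
    intro s acc h
    cases s with
    | nil => simp [PySem.Chars.replace.go]
    | cons c t =>
      have hlen : t.length ≤ fuel := by simp at h; omega
      simp only [PySem.Chars.replace.go]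
      by_cases hc : c = o
      · subst hc
        rw [if_pos (by simp [List.isPrefixOf])]
        rw [show List.drop [c].length (c :: t) = t by simp]
        rw [ih t ([n'].reverse ++ acc) hlen]
        simp
      · rw [if_neg (by simp [List.isPrefixOf, Ne.symm hc])]
        rw [ih t (c :: acc) hlen]
        simp [hc]

theorem pvReplace_single (s : List Char) (o n' : Char) :
    PySem.Chars.replace s [o] [n'] = s.map (fun c => if c = o then n' else c) := by
  simp only [PySem.Chars.replace, List.isEmpty]
  rw [if_neg (by simp)]
  rw [pvReplaceGo_single o n' s.length s [] (le_refl _)]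
  simp

-- splitOn with a single-char separator is pvSplitc
theorem pvSplitOnGo_single (dd : Char) (fuel : Nat) :
    ∀ (l cur : List Char) (acc : List (List Char)), l.length ≤ fuel →
      PySem.Chars.splitOn.go [dd] fuel l cur acc
        = acc.reverse ++ (pvSplitc (· == dd) l).modifyHead (cur.reverse ++ ·) := by
  induction fuel with
  | zero =>
    intro l cur acc h
    have : l = [] := List.eq_nil_of_length_eq_zero (Nat.le_zero.mp h)
    subst this
    simp [PySem.Chars.splitOn.go, pvSplitc]
  | succ fuel ih =>
    intro l cur acc h
    cases l with
    | nil => simp [PySem.Chars.splitOn.go, pvSplitc]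
    | cons c t =>
      have hlen : t.length ≤ fuel := by simp at h; omega
      simp only [PySem.Chars.splitOn.go]
      by_cases hc : c = dd
      · subst hc
        rw [if_pos (by simp [List.isPrefixOf])]
        rw [show List.drop [c].length (c :: t) = t by simp]
        rw [ih t [] (cur.reverse :: acc) hlen]
        have hsp : pvSplitc (· == c) (c :: t) = [] :: pvSplitc (· == c) t := by
          simp [pvSplitc]
        rw [hsp]
        cases hl : pvSplitc (· == c) t <;> simp [hl]
      · rw [if_neg (by simp [List.isPrefixOf, Ne.symm hc])]
        rw [ih t (c :: cur) acc hlen]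
        have hbe : (c == dd) = false := by simp [hc]
        have hsp : pvSplitc (· == dd) (c :: t) = (pvSplitc (· == dd) t).modifyHead (c :: ·) := by
          simp [pvSplitc, hbe]
        rw [hsp]
        obtain ⟨a, l', hl⟩ := List.exists_cons_of_ne_nil (pvSplitc_ne_nil (· == dd) t)
        simp [hl]

theorem pvSplitOn_single (s : List Char) (dd : Char) :
    PySem.Chars.splitOn s [dd] = pvSplitc (· == dd) s := by
  simp only [PySem.Chars.splitOn]
  rw [pvSplitOnGo_single dd (s.length + 1) s [] [] (by omega)]
  obtain ⟨a, l', hl⟩ := List.exists_cons_of_ne_nil (pvSplitc_ne_nil (· == dd) s)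
  simp [hl]

-- the two replaces followed by split on '.' = split on the delimiter set
theorem pvSplitc_map (t : List Char) :
    pvSplitc (· == '.')
      (t.map ((fun c => if c = '_' then '.' else c) ∘ (fun c => if c = '-' then '.' else c)))
      = pvSplitc pvIsDelim t := by
  induction t with
  | nil => rfl
  | cons c t ih =>
    simp only [List.map_cons, Function.comp]
    by_cases h1 : c = '-'
    · subst h1; simp [pvSplitc, pvIsDelim, ih]
    · by_cases h2 : c = '_'
      · subst h2; simp [pvSplitc, pvIsDelim, ih]
      · by_cases h3 : c = '.'
        · subst h3; simp [pvSplitc, pvIsDelim, ih]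
        · have hdel : pvIsDelim c = false := by simp [pvIsDelim, h1, h2, h3]
          simp [pvSplitc, h1, h2, h3, hdel, ih]

-- A's per-token test, in structural form
def pvDcTok (p : List Char) : Bool := ['d', 'c'].isPrefixOf p && (p.drop 2).all PySem.Chars.isdigit

def pvDCL : List Char := "domaincontroller".toList

def pvMatchTok (p : List Char) : Bool :=
  (p == "dc".toList) ||
  (decide ((2 : Int) < PySem.Chars.len p) && PySem.Chars.startswith p "dc".toList
    && PySem.Chars.strIsdigit (PySem.List.slice p (some 2) none)) ||
  PySem.Chars.isIn pvDCL p

theorem pvMatchTok_eq (p : List Char) :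
    pvMatchTok p = (pvDcTok p || PySem.Chars.isIn pvDCL p) := by
  rcases p with _ | ⟨a, _ | ⟨b, rest⟩⟩
  · rfl
  · simp only [pvMatchTok, pvDcTok]
    have h1 : ([a] == "dc".toList) = false := by simp [show "dc".toList = ['d','c'] from rfl]
    have h2 : ((2 : Int) < PySem.Chars.len [a]) = False := by
      simp only [PySem.Chars.len_eq, List.length_cons, List.length_nil]
      norm_num
    have h3 : (['d','c'].isPrefixOf [a]) = false := by
      cases hcd : (['d','c'].isPrefixOf [a]) with
      | false => rfl
      | true =>
        have := List.isPrefixOf_iff_prefix.mp hcd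
        have := this.length_le
        simp at this
    simp [h1, h2, h3]
  · -- p = a :: b :: rest
    simp only [pvMatchTok, pvDcTok]
    by_cases hab : a = 'd' ∧ b = 'c'
    · obtain ⟨ha, hb⟩ := hab
      subst ha; subst hb
      have hpre : (['d','c'].isPrefixOf ('d'::'c'::rest)) = true := by
        simp [List.isPrefixOf]
      have hsl : PySem.List.slice ('d'::'c'::rest) (some 2) none = rest := by
        rw [show (2 : Int) = ((2 : Nat) : Int) by norm_num, PySem.List.slice_from_natCast]
        rfl
      cases rest with
      | nil =>
        simp [show "dc".toList = ['d','c'] from rfl, hpre]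
      | cons r rs =>
        have hne : (('d'::'c'::r::rs : List Char) == "dc".toList) = false := by
          simp [show "dc".toList = ['d','c'] from rfl]
        have hlen : ((2 : Int) < PySem.Chars.len ('d'::'c'::r::rs)) = True := by
          simp only [PySem.Chars.len_eq, List.length_cons]
          norm_num
          push_cast
          omega
        have hsw2 : PySem.Chars.startswith ('d'::'c'::r::rs) ['d','c'] = true := by
          simp [PySem.Chars.startswith, List.isPrefixOf]
        simp only [hne, hpre, hsl, hlen, decide_true, Bool.true_and, Bool.false_or]
        simp [PySem.Chars.strIsdigit, List.isEmpty, hsw2]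
    · have hne : ((a::b::rest : List Char) == "dc".toList) = false := by
        simp only [show "dc".toList = ['d','c'] from rfl, List.cons_beq_cons]
        by_cases ha : a = 'd'
        · have hb : b ≠ 'c' := fun hb => hab ⟨ha, hb⟩
          simp [hb]
        · simp [ha]
      have hsw : (PySem.Chars.startswith (a::b::rest) "dc".toList) = false := by
        rw [show "dc".toList = ['d','c'] from rfl]
        cases hcd : PySem.Chars.startswith (a::b::rest) ['d','c'] with
        | false => rfl
        | true =>
          have := PySem.Chars.startswith_iff (a::b::rest) ['d','c'] |>.mp hcd
          obtain ⟨u, hu⟩ := this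
          cases u with
          | nil => simp at hu; exact absurd ⟨hu.1.symm, hu.2.1.symm⟩ hab
          | cons x xs => simp at hu; exact absurd ⟨hu.1.symm, hu.2.1.symm⟩ hab
      have hpf : (['d','c'].isPrefixOf (a::b::rest)) = false := by
        cases hcd : (['d','c'].isPrefixOf (a::b::rest)) with
        | false => rfl
        | true =>
          have := List.isPrefixOf_iff_prefix.mp hcd
          obtain ⟨u, hu⟩ := this
          cases u with
          | nil => simp at hu; exact absurd ⟨hu.1.symm, hu.2.1.symm⟩ hab
          | cons x xs => simp at hu; exact absurd ⟨hu.1.symm, hu.2.1.symm⟩ hab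
      rw [show ("dc" : String).toList = ['d','c'] from rfl] at hsw
      simp [hne, hsw, hpf]
      intro ha hb _
      exact absurd ⟨ha, hb⟩ hab

-- pvDCL facts
theorem pvDCL_head_d : pvDCL = 'd' :: "omaincontroller".toList := rfl

theorem pvDCL_no_delim : ∀ c ∈ pvDCL, pvIsDelim c = false := by
  have h : pvDCL.all (fun c => !pvIsDelim c) = true := rfl
  intro c hc
  have := List.all_eq_true.mp h c hc
  simpa using this

-- the first token is a prefix of the string
theorem pvSplitc_headI_prefix (d : Char → Bool) (t : List Char) :
    (pvSplitc d t).headI <+: t := by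
  induction t with
  | nil => simp [pvSplitc]
  | cons c t ih =>
    cases hd : d c with
    | true => simp [pvSplitc_cons_pos d c t hd]
    | false =>
      rw [pvSplitc_cons_neg d c t hd]
      obtain ⟨a, l', hl⟩ := List.exists_cons_of_ne_nil (pvSplitc_ne_nil d t)
      rw [hl]
      simp only [List.modifyHead, List.headI]
      rw [hl] at ih
      simp only [List.headI] at ih
      exact List.cons_prefix_cons.mpr ⟨rfl, ih⟩

-- a delimiter-free prefix of the string is a prefix of the first token
theorem pvPrefix_firstTok (d : Char → Bool) :
    ∀ (t u : List Char), u <+: t → (∀ c ∈ u, d c = false) → u <+: (pvSplitc d t).headI := by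
  intro t
  induction t with
  | nil => intro u hu _; simpa [pvSplitc] using hu
  | cons e r ih =>
    intro u hu hfree
    cases u with
    | nil => simp
    | cons x u' =>
      obtain ⟨hx, hu'⟩ := List.cons_prefix_cons.mp hu
      subst hx
      have hxd : d x = false := hfree x (by simp)
      rw [pvSplitc_cons_neg d x r hxd]
      obtain ⟨a, l', hl⟩ := List.exists_cons_of_ne_nil (pvSplitc_ne_nil d r)
      rw [hl]
      simp only [List.modifyHead, List.headI]
      have := ih u' hu' (fun c hc => hfree c (by simp [hc]))
      rw [hl] at this
      simp only [List.headI] at this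
      exact List.cons_prefix_cons.mpr ⟨rfl, this⟩

-- (a): the "domaincontroller" substring test distributes over tokens
theorem pvDcIn_tokens (t : List Char) :
    (pvSplitc pvIsDelim t).any (fun p => PySem.Chars.isIn pvDCL p)
      = PySem.Chars.isIn pvDCL t := by
  induction t with
  | nil => simp [pvSplitc, PySem.Chars.isIn_eq_false_iff, pvDCL]
  | cons c t ih =>
    by_cases hd : pvIsDelim c
    · rw [pvSplitc_cons_pos pvIsDelim c t hd]
      simp only [List.any_cons]
      have h0 : PySem.Chars.isIn pvDCL ([] : List Char) = false := by
        rw [PySem.Chars.isIn_eq_false_iff]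
        simp [pvDCL]
      have h2 : PySem.Chars.isIn pvDCL (c :: t) = PySem.Chars.isIn pvDCL t := by
        cases h3 : PySem.Chars.isIn pvDCL t with
        | true =>
          rw [PySem.Chars.isIn_iff_infix] at h3 ⊢
          exact h3.trans (List.suffix_cons c t).isInfix
        | false =>
          rw [PySem.Chars.isIn_eq_false_iff] at h3 ⊢
          intro hinf
          rcases List.infix_cons_iff.mp hinf with hpre | hinf'
          · rw [pvDCL_head_d] at hpre
            have := (List.cons_prefix_cons.mp hpre).1
            subst this
            exact absurd hd (by simp [pvDCL_no_delim 'd' (by rw [pvDCL_head_d]; simp)])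
          · exact h3 hinf'
      rw [h0, h2, ← ih]
      simp
    · rw [pvSplitc_cons_neg pvIsDelim c t (by simpa using hd)]
      obtain ⟨h', tl', hl⟩ := List.exists_cons_of_ne_nil (pvSplitc_ne_nil pvIsDelim t)
      rw [hl]
      simp only [List.modifyHead, List.any_cons]
      rw [hl] at ih
      simp only [List.any_cons] at ih
      have hpref : h' <+: t := by
        have := pvSplitc_headI_prefix pvIsDelim t
        rw [hl] at this; simpa using this
      -- both sides as infix conditions
      cases hmain : PySem.Chars.isIn pvDCL (c :: t) with
      | true =>
        rw [PySem.Chars.isIn_iff_infix] at hmain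
        rcases List.infix_cons_iff.mp hmain with hpre | hinf'
        · -- DCL is a prefix of c :: t; push into the first token
          rw [pvDCL_head_d] at hpre
          obtain ⟨hc, hu⟩ := List.cons_prefix_cons.mp hpre
          have hufree : ∀ ch ∈ "omaincontroller".toList, pvIsDelim ch = false := by
            intro ch hch
            exact pvDCL_no_delim ch (by rw [pvDCL_head_d]; exact List.mem_cons_of_mem _ hch)
          have := pvPrefix_firstTok pvIsDelim t "omaincontroller".toList hu hufree
          rw [hl] at this
          simp only [List.headI] at this
          have hin : PySem.Chars.isIn pvDCL (c :: h') = true := by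
            rw [PySem.Chars.isIn_iff_infix, pvDCL_head_d]
            exact (List.cons_prefix_cons.mpr ⟨hc, this⟩).isInfix
          simp [hin]
        · have : PySem.Chars.isIn pvDCL t = true := PySem.Chars.isIn_iff_infix _ _ |>.mpr hinf'
          rw [← ih] at this
          rcases Bool.or_eq_true _ _ |>.mp this with h | h
          · -- DCL in h', hence in c :: h'
            have : PySem.Chars.isIn pvDCL (c :: h') = true := by
              rw [PySem.Chars.isIn_iff_infix] at h ⊢
              exact h.trans (List.suffix_cons c h').isInfix
            simp [this]
          · simp [h]
      | false =>
        rw [PySem.Chars.isIn_eq_false_iff] at hmain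
        have ht : PySem.Chars.isIn pvDCL t = false := by
          rw [PySem.Chars.isIn_eq_false_iff]
          intro hinf
          exact hmain (hinf.trans (List.suffix_cons c t).isInfix)
        rw [← ih] at ht
        rcases Bool.or_eq_false_iff.mp ht with ⟨h1, h2⟩
        have hch : PySem.Chars.isIn pvDCL (c :: h') = false := by
          rw [PySem.Chars.isIn_eq_false_iff]
          intro hinf
          apply hmain
          rcases List.infix_cons_iff.mp hinf with hpre | hinf'
          · -- prefix of c :: h' extends to prefix of c :: t
            rw [pvDCL_head_d] at hpre ⊢
            obtain ⟨hc, hu⟩ := List.cons_prefix_cons.mp hpre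
            exact (List.cons_prefix_cons.mpr ⟨hc, hu.trans hpref⟩).isInfix
          · rw [PySem.Chars.isIn_eq_false_iff] at h1
            exact absurd hinf' h1
        simp [hch, h2]

-- state 4 is absorbing
theorem pvF4 (t : List Char) : t.foldl dcStep 4 = 4 := by
  induction t with
  | nil => simp
  | cons c t ih => simpa [dcStep] using ih

-- the DFA invariant: the four live states against the token decomposition
theorem pvDFA (t : List Char) :
    (decide (3 ≤ t.foldl dcStep 0) = (pvSplitc pvIsDelim t).any pvDcTok)
    ∧ (decide (3 ≤ t.foldl dcStep 1) = ((pvSplitc pvIsDelim t).tail.any pvDcTok))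
    ∧ (decide (3 ≤ t.foldl dcStep 2)
        = (pvDcTok ('d' :: (pvSplitc pvIsDelim t).headI) || (pvSplitc pvIsDelim t).tail.any pvDcTok))
    ∧ (decide (3 ≤ t.foldl dcStep 3)
        = ((((pvSplitc pvIsDelim t).headI).all PySem.Chars.isdigit) || (pvSplitc pvIsDelim t).tail.any pvDcTok)) := by
  induction t with
  | nil =>
    refine ⟨by decide, by decide, ?_, by simp [pvSplitc, pvDcTok]⟩
    simp [pvSplitc, pvDcTok, List.isPrefixOf]
  | cons c t ih =>
    obtain ⟨ih0, ih1, ih2, ih3⟩ := ih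
    obtain ⟨h', tl', hl⟩ := List.exists_cons_of_ne_nil (pvSplitc_ne_nil pvIsDelim t)
    by_cases hd : pvIsDelim c
    · have hs : pvSplitc pvIsDelim (c :: t) = [] :: pvSplitc pvIsDelim t := by
        simp [pvSplitc, hd]
      have hdelim : (c == '.' || c == '_' || c == '-') = true := by
        simp only [pvIsDelim, Bool.or_eq_true] at hd ⊢
        tauto
      have hstep0 : dcStep 0 c = 0 := by simp [dcStep, hdelim]
      have hstep1 : dcStep 1 c = 0 := by simp [dcStep, hdelim]
      have hstep2 : dcStep 2 c = 0 := by simp [dcStep, hdelim]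
      have hstep3 : dcStep 3 c = 4 := by simp [dcStep, hdelim]
      refine ⟨?_, ?_, ?_, ?_⟩
      · simp only [List.foldl_cons, hstep0, hs, List.any_cons, ih0]
        simp [pvDcTok, List.isPrefixOf]
      · simp only [List.foldl_cons, hstep1, hs, List.tail_cons, ih0]
      · simp only [List.foldl_cons, hstep2, hs, List.headI, List.tail_cons, ih0]
        simp [pvDcTok, List.isPrefixOf]
      · simp only [List.foldl_cons, hstep3, pvF4, hs, List.headI, List.tail_cons]
        simp
    · have hs : pvSplitc pvIsDelim (c :: t) = (c :: h') :: tl' := by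
        rw [pvSplitc_cons_neg pvIsDelim c t (by simpa using hd), hl]
        rfl
      have hdelim : (c == '.' || c == '_' || c == '-') = false := by
        simp only [pvIsDelim, Bool.or_eq_true] at hd
        push_neg at hd
        simp only [Bool.or_eq_false_iff]
        refine ⟨⟨?_, ?_⟩, ?_⟩ <;> simp_all
      have hany : (pvSplitc pvIsDelim t).any pvDcTok = (pvDcTok h' || tl'.any pvDcTok) := by
        rw [hl]; simp
      have hheadI : (pvSplitc pvIsDelim t).headI = h' := by rw [hl]; rfl
      have htail : (pvSplitc pvIsDelim t).tail = tl' := by rw [hl]; rfl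
      rw [hheadI] at ih2 ih3
      rw [htail] at ih1 ih2 ih3
      refine ⟨?_, ?_, ?_, ?_⟩
      · -- state 0
        by_cases hcd : c = 'd'
        · subst hcd
          have hstep : dcStep 0 'd' = 2 := by simp [dcStep, hdelim]
          rw [List.foldl_cons, hstep, ih2, hs]
          simp only [List.any_cons, hany]
        · have : dcStep 0 c = 1 := by simp [dcStep, hdelim, hcd]
          simp only [List.foldl_cons, this, ih1, hs, List.any_cons]
          have : pvDcTok (c :: h') = false := by
            simp only [pvDcTok, List.isPrefixOf]
            have : ('d' == c) = false := beq_eq_false_iff_ne.mpr (fun h => hcd h.symm)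
            simp [this]
          simp [this]
      · -- state 1
        have : dcStep 1 c = 1 := by simp [dcStep, hdelim]
        simp only [List.foldl_cons, this, ih1, hs, List.tail_cons]
      · -- state 2
        by_cases hcc : c = 'c'
        · subst hcc
          have hstep : dcStep 2 'c' = 3 := by simp [dcStep, hdelim]
          rw [List.foldl_cons, hstep, ih3, hs]
          simp only [List.headI, List.tail_cons]
          have hdt : pvDcTok ('d' :: 'c' :: h') = h'.all PySem.Chars.isdigit := by
            simp [pvDcTok, List.isPrefixOf]
          rw [hdt]
        · have : dcStep 2 c = 1 := by simp [dcStep, hdelim, hcc]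
          simp only [List.foldl_cons, this, ih1, hs, List.headI, List.tail_cons]
          have : pvDcTok ('d' :: c :: h') = false := by
            simp only [pvDcTok, List.isPrefixOf]
            have : ('c' == c) = false := beq_eq_false_iff_ne.mpr (fun h => hcc h.symm)
            simp [this]
          simp [this]
      · -- state 3
        by_cases hdig : PySem.Chars.isdigit c = true
        · have : dcStep 3 c = 3 := by
            simp only [PySem.Chars.isdigit, Bool.and_eq_true, decide_eq_true_eq] at hdig
            simp [dcStep, hdelim, hdig.1, hdig.2]
          simp only [List.foldl_cons, this, ih3, hs, List.headI, List.tail_cons]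
          congr 1
          simp [List.all_cons, hdig]
        · have : dcStep 3 c = 1 := by
            simp only [PySem.Chars.isdigit, Bool.and_eq_true, decide_eq_true_eq] at hdig
            push_neg at hdig
            by_cases h0 : '0' ≤ c
            · simp [dcStep, hdelim, h0, hdig h0]
            · simp [dcStep, hdelim, h0]
          simp only [List.foldl_cons, this, ih1, hs, List.headI, List.tail_cons]
          have hdf : (c :: h').all PySem.Chars.isdigit = false := by
            simp [List.all_cons, hdig]
          simp [hdf]

-- per-hostname equality of the two inner computations
theorem pvPerHost (hn : String) :
    ((PySem.Chars.splitOn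
        (PySem.Str.replace (PySem.Str.replace (PySem.Str.lower hn) "-" ".") "_" ".").toList ['.']).any
      fun p =>
        (p == "dc".toList) ||
        (decide ((2 : Int) < PySem.Chars.len p) && PySem.Chars.startswith p "dc".toList
          && PySem.Chars.strIsdigit (PySem.List.slice p (some 2) none)) ||
        PySem.Chars.isIn "domaincontroller".toList p)
    = (PySem.Str.isIn "domaincontroller" (PySem.Str.lower hn) || dcScan (PySem.Str.lower hn)) := by
  have hlist : (PySem.Str.replace (PySem.Str.replace (PySem.Str.lower hn) "-" ".") "_" ".").toList
      = ((PySem.Chars.lower hn.toList).map (fun c => if c = '-' then '.' else c)).map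
          (fun c => if c = '_' then '.' else c) := by
    rw [PySem.Str.toList_replace, PySem.Str.toList_replace, PySem.Str.toList_lower]
    rw [show ("-" : String).toList = ['-'] from rfl, show ("." : String).toList = ['.'] from rfl,
        show ("_" : String).toList = ['_'] from rfl]
    rw [pvReplace_single, pvReplace_single]
  set t := PySem.Chars.lower hn.toList with ht
  have hsplit : PySem.Chars.splitOn
      (PySem.Str.replace (PySem.Str.replace (PySem.Str.lower hn) "-" ".") "_" ".").toList ['.']
      = pvSplitc pvIsDelim t := by
    rw [hlist, pvSplitOn_single, List.map_map, pvSplitc_map]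
  rw [hsplit]
  have hany : (pvSplitc pvIsDelim t).any
      (fun p =>
        (p == "dc".toList) ||
        (decide ((2 : Int) < PySem.Chars.len p) && PySem.Chars.startswith p "dc".toList
          && PySem.Chars.strIsdigit (PySem.List.slice p (some 2) none)) ||
        PySem.Chars.isIn "domaincontroller".toList p)
      = ((pvSplitc pvIsDelim t).any pvDcTok
          || (pvSplitc pvIsDelim t).any (fun p => PySem.Chars.isIn pvDCL p)) := by
    induction (pvSplitc pvIsDelim t) with
    | nil => simp
    | cons p ps ih =>
      simp only [List.any_cons, ih]
      have := pvMatchTok_eq p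
      simp only [pvMatchTok] at this
      rw [show pvDCL = "domaincontroller".toList from rfl] at this
      rw [this]
      ac_rfl
  rw [hany, pvDcIn_tokens, ← (pvDFA t).1]
  have hIn : PySem.Str.isIn "domaincontroller" (PySem.Str.lower hn) = PySem.Chars.isIn pvDCL t := by
    rw [PySem.Str.isIn_eq, PySem.Str.toList_lower]
    rfl
  have hScan : dcScan (PySem.Str.lower hn) = decide (3 ≤ t.foldl dcStep 0) := by
    unfold dcScan
    rw [PySem.Str.toList_lower]
  rw [hIn, hScan]
  exact Bool.or_comm _ _

-- ===== VERDICT (by name: the statement is the Claim_ definition above) =====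
theorem dc_hostname_py_spec : Claim_equal_dc_hostname_py := by
  intro hostnames hD
  clear hD
  show dc_hostname_py hostnames = dc_hostname_py_alt hostnames
  unfold dc_hostname_py dc_hostname_py_alt
  induction hostnames with
  | nil => simp
  | cons hn rest ih =>
    rw [List.any_cons, List.any_cons, ih, pvPerHost hn]
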